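-- pv_equiv track=rewrite | github.com/krusta80/DeepReinforcementLearning | games/splendor/chip_moves.py | interweave_zeroes
-- ===== SOURCE A (Python) =====
-- def interweave_zeroes(i):
--     interwoven = 0
--     mask_bit = 0
--
--     while i > 0:
--         interwoven = interwoven | ((i & 1) << (3 * mask_bit))
--         mask_bit += 1
--         i = i >> 1
--     return interwoven
-- ===== SOURCE B (Python) =====
-- def interweave_zeroes(i):
--     # i's binary digits, read as an octal numeral, place bit k at position 3k
--     return int(bin(i)[2:], 8) if i > 0 else 0
-- ===== Notes on version B (the rewrite author's own statement) =====
-- stated objective: idiomatic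
-- what changed: B replaces A's bit-by-bit shift/mask loop with the observation that spreading bits three apart is reading i's binary digits as an octal numeral: int(bin(i)[2:], 8), with 0 for non-positive i where A's loop never runs.
import Mathlib
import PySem

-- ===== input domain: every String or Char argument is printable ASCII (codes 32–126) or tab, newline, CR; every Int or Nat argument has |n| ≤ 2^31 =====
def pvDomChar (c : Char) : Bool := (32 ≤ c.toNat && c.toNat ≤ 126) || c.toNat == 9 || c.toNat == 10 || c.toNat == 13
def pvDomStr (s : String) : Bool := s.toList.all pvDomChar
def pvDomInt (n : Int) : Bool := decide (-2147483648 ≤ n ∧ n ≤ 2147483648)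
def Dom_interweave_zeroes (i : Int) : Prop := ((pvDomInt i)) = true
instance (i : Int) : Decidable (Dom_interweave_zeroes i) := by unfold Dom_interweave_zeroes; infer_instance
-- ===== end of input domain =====

-- B reads i's binary digits as an octal numeral instead of A's bit-by-bit shift/mask loop; same result, more direct.


-- ===== PORT A =====
-- A's while loop. The loop only runs while i > 0, and `interwoven` and the shifted
-- bit are then nonnegative, so Python's `i & 1` is exactly i.toNat % 2, `i >> 1` is
-- exactly i.toNat / 2, and `|` is exactly Nat.lor on the .toNat values.
def interweaveLoopA (i interwoven : Int) (mask_bit : Nat) : Int :=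
  if _h : 0 < i then
    interweaveLoopA ((i.toNat / 2 : Nat) : Int)
      (((interwoven.toNat ||| ((i.toNat % 2) <<< (3 * mask_bit)) : Nat) : Int))
      (mask_bit + 1)
  else interwoven
termination_by i.toNat
decreasing_by
  have : 0 < i.toNat := by omega
  simp only [Int.toNat_natCast]
  omega

def interweave_zeroes (i : Int) : Int := interweaveLoopA i 0 0

-- ===== PORT B =====
-- the digit string bin(i)[2:] of a positive i, most significant digit first
def binDigitsB : Nat → List Nat
  | 0 => []
  | n + 1 => binDigitsB ((n + 1) / 2) ++ [(n + 1) % 2]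
decreasing_by omega

-- int(·, 8): parse a base-8 digit list, most significant first
def parseOct (ds : List Nat) : Nat := ds.foldl (fun acc d => 8 * acc + d) 0

def interweave_zeroes_alt (i : Int) : Int :=
  if 0 < i then ((parseOct (binDigitsB i.toNat) : Nat) : Int) else 0

-- ===== PRECONDITION & SPEC =====
def Spec_interweave_zeroes (i : Int) (out : Int) : Prop := out = interweave_zeroes_alt i
instance (i : Int) (out : Int) : Decidable (Spec_interweave_zeroes i out) := by unfold Spec_interweave_zeroes; infer_instance

-- ===== CLAIM (what is proved, stated in full; the proofs are below) =====
def Claim_equal_interweave_zeroes : Prop := ∀ (i : Int), Dom_interweave_zeroes i → Spec_interweave_zeroes i (interweave_zeroes i)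

-- ===== LEMMAS AND PROOFS =====

-- little-endian characterisation of the common value: bit k of n contributes 8^k
def octSpread : Nat → Nat
  | 0 => 0
  | n + 1 => (n + 1) % 2 + 8 * octSpread ((n + 1) / 2)
decreasing_by omega

theorem parseOct_append (L : List Nat) (d : Nat) :
    parseOct (L ++ [d]) = 8 * parseOct L + d := by
  unfold parseOct
  simp [List.foldl_append]

theorem parseOct_binDigits (n : Nat) : parseOct (binDigitsB n) = octSpread n := by
  induction n using Nat.strong_induction_on with
  | _ n ih =>
    cases n with
    | zero => simp [binDigitsB, octSpread, parseOct]
    | succ k =>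
        rw [binDigitsB, octSpread, parseOct_append, ih ((k + 1) / 2) (by omega)]
        ring

theorem interweaveLoopA_eq (n acc m : Nat) (hacc : acc < 2 ^ (3 * m)) :
    interweaveLoopA (n : Int) (acc : Int) m = ((acc + 2 ^ (3 * m) * octSpread n : Nat) : Int) := by
  induction n using Nat.strong_induction_on generalizing acc m with
  | _ n ih =>
    rw [interweaveLoopA]
    cases n with
    | zero => simp [octSpread]
    | succ k =>
        have hpos : (0 : Int) < ((k + 1 : Nat) : Int) := by positivity
        rw [dif_pos hpos]
        simp only [Int.toNat_natCast]
        -- the or of the disjoint parts is their sum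
        have hor : acc ||| ((k + 1) % 2) <<< (3 * m)
            = acc + 2 ^ (3 * m) * ((k + 1) % 2) := by
          rw [Nat.shiftLeft_eq, Nat.lor_comm,
              show ((k + 1) % 2) * 2 ^ (3 * m) = 2 ^ (3 * m) * ((k + 1) % 2) by ring,
              ← Nat.two_pow_add_eq_or_of_lt hacc]
          ring
        rw [hor]
        have hlt : acc + 2 ^ (3 * m) * ((k + 1) % 2) < 2 ^ (3 * (m + 1)) := by
          have h8 : 2 ^ (3 * (m + 1)) = 2 ^ (3 * m) * 8 := by
            rw [show 3 * (m + 1) = 3 * m + 3 by ring, pow_add]; norm_num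
          have : (k + 1) % 2 ≤ 1 := by omega
          nlinarith [pow_pos (show 0 < 2 by norm_num) (3 * m)]
        rw [ih ((k + 1) / 2) (by omega) _ _ hlt]
        have h8 : 2 ^ (3 * (m + 1)) = 2 ^ (3 * m) * 8 := by
          rw [show 3 * (m + 1) = 3 * m + 3 by ring, pow_add]; norm_num
        rw [octSpread, h8]
        push_cast
        ring

-- ===== VERDICT (by name: the statement is the Claim_ definition above) =====
theorem interweave_zeroes_spec : Claim_equal_interweave_zeroes := by
  intro i _
  unfold Spec_interweave_zeroes interweave_zeroes interweave_zeroes_alt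
  by_cases h : 0 < i
  · have hi : ((i.toNat : Nat) : Int) = i := by omega
    have h0 : (0 : Int) = ((0 : Nat) : Int) := by simp
    rw [← hi, h0, interweaveLoopA_eq i.toNat 0 0 (by norm_num)]
    rw [if_pos (show (((0 : Nat) : Int)) < ((i.toNat : Nat) : Int) by omega)]
    simp [parseOct_binDigits]
    congr 1
    omega
  · unfold interweaveLoopA
    simp [h]
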